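-- pv_equiv track=rewrite | github.com/zhiyuan0828/W4111-Intro-to-Databases-Spring-2024 | Homework/HW2/HW2 Programming/src/db.py | build_delete_query
-- ===== SOURCE A (Python) =====
-- from typing import Any, Dict, List, Tuple, Union
--
-- KV = Dict[str, Any]
--
-- Query = Tuple[str, List]
--
-- def build_delete_query(table: str, filters: KV) -> Query:
-- 	"""Builds a query that deletes rows. See db_test for examples.
--
-- 	:param table: The table to be deleted from
-- 	:param filters: Key-value pairs that the rows to be deleted must satisfy
-- 	:returns: A query string and any placeholder arguments
-- 	"""
-- 	# start with the DELETE FROM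
-- 	query_str = 'DELETE FROM '
--
-- 	# add the table
-- 	query_str += table
-- 	query_str += ' '
--
-- 	# add the WHERE and the filter
-- 	replace_val = []
--
-- 	if len(filters) == 0:
-- 		query_str = query_str[:-1]
-- 	else:
-- 		query_str += 'WHERE '
-- 		for i in range(len(filters) - 1):
-- 			query_str += list(filters.keys())[i]
-- 			query_str += ' = %s AND '
-- 			replace_val.append(list(filters.values())[i])
--
-- 		query_str += list(filters.keys())[-1]
-- 		query_str += ' = %s'
-- 		replace_val.append(list(filters.values())[-1])
--
-- 	return query_str, replace_val
-- ===== SOURCE B (Python) =====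
-- def build_delete_query(table, filters):
-- 	"""Builds a query that deletes rows.
--
-- 	Divide-and-conquer re-implementation: the WHERE clause is built by
-- 	recursively splitting the filter items in half and joining the two
-- 	halves' SQL with " AND ".
-- 	"""
-- 	items = list(filters.items())
--
-- 	def clause(sub):
-- 		# sub is a nonempty list of (key, value) pairs
-- 		if len(sub) == 1:
-- 			k, v = sub[0]
-- 			return k + " = %s", [v]
-- 		mid = len(sub) // 2
-- 		left_sql, left_vals = clause(sub[:mid])
-- 		right_sql, right_vals = clause(sub[mid:])
-- 		return left_sql + " AND " + right_sql, left_vals + right_vals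
--
-- 	if not items:
-- 		return "DELETE FROM " + table, []
-- 	sql, vals = clause(items)
-- 	return "DELETE FROM " + table + " WHERE " + sql, vals
-- ===== Notes on version B (the rewrite author's own statement) =====
-- stated objective: faster
-- what changed: Replaces the index-range loop (which rebuilds list(filters.keys())/list(filters.values()) on every iteration and special-cases the last clause and the trailing space) by a divide-and-conquer construction that splits the filter items in half and joins the halves' SQL with " AND ".
import Mathlib
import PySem

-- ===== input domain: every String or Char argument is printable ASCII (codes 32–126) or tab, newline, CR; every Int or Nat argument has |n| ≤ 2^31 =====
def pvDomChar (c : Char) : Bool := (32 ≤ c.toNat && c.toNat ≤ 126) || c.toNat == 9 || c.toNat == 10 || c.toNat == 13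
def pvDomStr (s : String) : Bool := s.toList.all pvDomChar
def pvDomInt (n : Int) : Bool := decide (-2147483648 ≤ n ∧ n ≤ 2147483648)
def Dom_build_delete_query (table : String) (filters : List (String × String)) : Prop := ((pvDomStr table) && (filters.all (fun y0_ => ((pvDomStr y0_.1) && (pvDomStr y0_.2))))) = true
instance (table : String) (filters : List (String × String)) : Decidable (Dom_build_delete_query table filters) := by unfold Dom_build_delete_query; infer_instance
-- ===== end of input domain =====

-- B replaces A's index-range loop (which re-lists the dict's keys/values on every iteration and
-- special-cases the last clause and the trailing space) by a divide-and-conquer build of the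
-- WHERE clause: split the items in half, recurse, join the halves with " AND ".

-- ===== PORT A =====
def build_delete_query (table : String) (filters : List (String × String)) : String × List String :=
  let query_str := "DELETE FROM "
  let query_str := query_str ++ table
  let query_str := query_str ++ " "
  let replace_val : List String := []
  if filters.length == 0 then
    (PySem.Str.slice query_str none (some (-1)), replace_val)
  else
    let query_str := query_str ++ "WHERE "
    let st := (PySem.List.pyRange 0 ((filters.length : Int) - 1)).foldl
      (fun (st : String × List String) i =>
        (st.1 ++ PySem.List.pyGetD (filters.map Prod.fst) i "" ++ " = %s AND ",
         st.2 ++ [PySem.List.pyGetD (filters.map Prod.snd) i ""]))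
      (query_str, replace_val)
    (st.1 ++ PySem.List.pyGetD (filters.map Prod.fst) (-1) "" ++ " = %s",
     st.2 ++ [PySem.List.pyGetD (filters.map Prod.snd) (-1) ""])

-- ===== PORT B =====
-- Source B's inner `clause(sub)` (a nonempty slice of the items): len(sub) == 1 is the base case,
-- otherwise split at mid = len(sub) // 2 into sub[:mid] / sub[mid:] (List.take / List.drop) and
-- join the two halves with " AND ".  (clause is never called on []; the [] equation is unreachable.)
def bdq_clause : List (String × String) → String × List String
  | [] => ("", [])
  | [kv] => (kv.1 ++ " = %s", [kv.2])
  | kv1 :: kv2 :: rest =>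
      let l := kv1 :: kv2 :: rest
      let mid := l.length / 2
      let left := bdq_clause (l.take mid)
      let right := bdq_clause (l.drop mid)
      (left.1 ++ " AND " ++ right.1, left.2 ++ right.2)
termination_by l => l.length
decreasing_by
  · simp; omega
  · simp; omega

def build_delete_query_alt (table : String) (filters : List (String × String)) : String × List String :=
  if filters.isEmpty then ("DELETE FROM " ++ table, [])
  else
    let c := bdq_clause filters
    ("DELETE FROM " ++ table ++ " WHERE " ++ c.1, c.2)

-- ===== PRECONDITION & SPEC =====
def Spec_build_delete_query (table : String) (filters : List (String × String)) (out : String × List String) : Prop := out = build_delete_query_alt table filters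
instance (table : String) (filters : List (String × String)) (out : String × List String) : Decidable (Spec_build_delete_query table filters out) := by unfold Spec_build_delete_query; infer_instance

-- ===== CLAIM (what is proved, stated in full; the proofs are below) =====
def Claim_equal_build_delete_query : Prop := ∀ (table : String) (filters : List (String × String)), Dom_build_delete_query table filters → Spec_build_delete_query table filters (build_delete_query table filters)

-- ===== LEMMAS AND PROOFS =====

-- xs[i] and xs[:-1][i] agree below the last index.
theorem pyGetD_dropLast {α : Type} (xs : List α) (j : Int) (d : α)
    (h0 : 0 ≤ j) (h : j < (xs.length : Int) - 1) :
    PySem.List.pyGetD xs j d = PySem.List.pyGetD xs.dropLast j d := by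
  rw [PySem.List.pyGetD_eq_getElem xs d h0 (by omega),
      PySem.List.pyGetD_eq_getElem xs.dropLast d h0 (by simp; omega)]
  simp [List.getElem_dropLast]

-- A's pair-state loop over range(len(filters)-1) splits into two structural folds over the dropLast lists.
theorem loopA (filters : List (String × String)) (h : filters ≠ []) (acc : String) :
  ((PySem.List.pyRange 0 ((filters.length : Int) - 1)).foldl
      (fun (st : String × List String) i =>
        (st.1 ++ PySem.List.pyGetD (filters.map Prod.fst) i "" ++ " = %s AND ",
         st.2 ++ [PySem.List.pyGetD (filters.map Prod.snd) i ""]))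
      (acc, []))
   = (((filters.map Prod.fst).dropLast).foldl (fun s k' => s ++ k' ++ " = %s AND ") acc,
      ((filters.map Prod.snd).dropLast)) := by
  rw [PySem.List.foldl_prod_mk
        (fun (s : String) i => s ++ PySem.List.pyGetD (filters.map Prod.fst) i "" ++ " = %s AND ")
        (fun (v : List String) i => v ++ [PySem.List.pyGetD (filters.map Prod.snd) i ""])]
  refine Prod.ext ?_ ?_ <;> simp only []
  · rw [PySem.List.foldl_congr_mem _ _
      (fun (s : String) i => s ++ PySem.List.pyGetD ((filters.map Prod.fst).dropLast) i "" ++ " = %s AND ") _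
      (by intro a x hx
          rw [PySem.List.mem_pyRange_one] at hx
          rw [pyGetD_dropLast _ x _ hx.1 (by simpa using hx.2)])]
    have hl : 1 ≤ filters.length := List.length_pos_iff.mpr h
    have hlen : ((filters.length : Int) - 1) = PySem.List.len ((filters.map Prod.fst).dropLast) := by
      simp [PySem.List.len]; omega
    rw [hlen, PySem.List.foldl_pyRange_pyGetD _ ""
          (fun (s : String) k' => s ++ k' ++ " = %s AND ") acc (le_refl 0)]
    simp
  · rw [PySem.List.foldl_congr_mem _ _
      (fun (s : List String) i => s ++ [PySem.List.pyGetD ((filters.map Prod.snd).dropLast) i ""]) _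
      (by intro a x hx
          rw [PySem.List.mem_pyRange_one] at hx
          rw [pyGetD_dropLast _ x _ hx.1 (by simpa using hx.2)])]
    have hl : 1 ≤ filters.length := List.length_pos_iff.mpr h
    have hlen : ((filters.length : Int) - 1) = PySem.List.len ((filters.map Prod.snd).dropLast) := by
      simp [PySem.List.len]; omega
    rw [hlen, PySem.List.foldl_pyRange_pyGetD _ ""
          (fun (v : List String) x => v ++ [x]) ([] : List String) (le_refl 0)]
    simp only [Int.toNat_zero, List.drop_zero, PySem.List.foldl_append_singleton, List.nil_append]

-- A's accumulated "k = %s AND " pieces followed by the final "k = %s" equal the " AND "-join of the clauses.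
theorem joinAux (ks : List String) (k : String) (acc : String) :
    (ks.foldl (fun s k' => s ++ k' ++ " = %s AND ") acc) ++ k ++ " = %s"
      = acc ++ PySem.Str.join " AND " ((ks ++ [k]).map (fun k' => k' ++ " = %s")) := by
  induction ks generalizing acc with
  | nil =>
    apply String.toList_inj.mp
    simp [PySem.Str.toList_join, PySem.Chars.join_singleton, String.toList_append]
  | cons a ks ih =>
    rcases hq : (ks ++ [k]).map (fun k' => k' ++ " = %s") with _ | ⟨q, rest⟩
    · simp at hq
    · simp only [List.foldl_cons] at *
      rw [ih]
      apply String.toList_inj.mp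
      simp [PySem.Str.toList_join, hq, PySem.Chars.join_cons_cons, String.toList_append]

-- join over a concatenation of two nonempty part lists (character level).
theorem chars_join_append (sep : List Char) (xs ys : List (List Char))
    (hx : xs ≠ []) (hy : ys ≠ []) :
    PySem.Chars.join sep (xs ++ ys)
      = PySem.Chars.join sep xs ++ sep ++ PySem.Chars.join sep ys := by
  induction xs with
  | nil => exact absurd rfl hx
  | cons a xs ih =>
    rcases xs with _ | ⟨b, xs⟩
    · rcases ys with _ | ⟨c, ys⟩
      · exact absurd rfl hy
      · simp [PySem.Chars.join_singleton, PySem.Chars.join_cons_cons]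
    · have := ih (by simp)
      simp only [List.cons_append] at *
      rw [PySem.Chars.join_cons_cons, PySem.Chars.join_cons_cons, this]
      simp [List.append_assoc]

-- the same at String level.
theorem str_join_append (sep : String) (xs ys : List String)
    (hx : xs ≠ []) (hy : ys ≠ []) :
    PySem.Str.join sep (xs ++ ys)
      = PySem.Str.join sep xs ++ sep ++ PySem.Str.join sep ys := by
  apply String.toList_inj.mp
  simp only [PySem.Str.toList_join, String.toList_append, List.map_append]
  exact chars_join_append _ _ _ (by simpa using hx) (by simpa using hy)

-- B's divide-and-conquer clause builder produces the " AND "-join of the clauses and the value list.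
theorem bdq_clause_eq (n : ℕ) : ∀ l : List (String × String), l.length ≤ n → l ≠ [] →
    bdq_clause l
      = (PySem.Str.join " AND " (l.map (fun kv => kv.1 ++ " = %s")), l.map Prod.snd) := by
  induction n with
  | zero => intro l hl hne; interval_cases h : l.length <;> simp_all
  | succ n ih =>
    intro l hl hne
    rcases l with _ | ⟨kv1, l⟩
    · exact absurd rfl hne
    rcases l with _ | ⟨kv2, rest⟩
    · rw [bdq_clause]
      refine Prod.ext ?_ (by simp)
      apply String.toList_inj.mp
      simp [PySem.Str.toList_join, PySem.Chars.join_singleton]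
    rw [bdq_clause]
    set L := kv1 :: kv2 :: rest with hL
    have hlen : 2 ≤ L.length := by simp [hL]
    have hmid1 : 1 ≤ L.length / 2 := by omega
    have hmid2 : L.length / 2 < L.length := by omega
    have htake : (L.take (L.length / 2)).length = L.length / 2 := by simp; omega
    have hdrop : (L.drop (L.length / 2)).length = L.length - L.length / 2 := by simp
    have h1 := ih (L.take (L.length / 2)) (by simp at hl ⊢; omega)
      (by intro h; rw [← List.length_eq_zero_iff] at h; omega)
    have h2 := ih (L.drop (L.length / 2)) (by simp at hl ⊢; omega)
      (by intro h; rw [← List.length_eq_zero_iff] at h; omega)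
    have htne : L.take (L.length / 2) ≠ [] := by
      intro h; rw [← List.length_eq_zero_iff] at h; omega
    have hdne : L.drop (L.length / 2) ≠ [] := by
      intro h; rw [← List.length_eq_zero_iff] at h; omega
    rw [h1, h2]
    refine Prod.ext ?_ ?_ <;> simp only []
    · rw [← str_join_append _ _ _ (by simpa using htne) (by simpa using hdne)]
      rw [← List.map_append, List.take_append_drop]
    · rw [← List.map_append, List.take_append_drop]

-- ===== VERDICT (by name: the statement is the Claim_ definition above) =====
theorem build_delete_query_spec : Claim_equal_build_delete_query := by
  intro table filters _
  unfold Spec_build_delete_query build_delete_query build_delete_query_alt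
  by_cases hf : filters = []
  · subst hf
    simp only [List.length_nil, List.isEmpty_nil, if_true, beq_self_eq_true]
    refine Prod.ext ?_ rfl
    apply String.toList_inj.mp
    simp [PySem.Str.toList_slice, PySem.Chars.slice, String.toList_append,
          PySem.List.slice_to_neg_one]
    rw [← List.cons_append, List.dropLast_concat]
  · have hkeys : filters.map Prod.fst ≠ [] := by simpa using hf
    have hvals : filters.map Prod.snd ≠ [] := by simpa using hf
    have hne : (filters.length == 0) = false := by simp [hf]
    have hie : filters.isEmpty = false := by simp [hf]
    simp only [hne, hie, Bool.false_eq_true, if_false]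
    rw [loopA filters hf]
    rw [PySem.List.pyGetD_neg_one _ _ hkeys, PySem.List.pyGetD_neg_one _ _ hvals]
    rw [bdq_clause_eq filters.length filters (le_refl _) hf]
    refine Prod.ext ?_ ?_
    · simp only []
      rw [joinAux, List.dropLast_append_getLast hkeys]
      apply String.toList_inj.mp
      simp [PySem.Str.toList_join, String.toList_append, List.map_map, Function.comp_def]
    · simp only []
      rw [List.dropLast_append_getLast hvals]
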